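-- pv_equiv track=rewrite | github.com/nlesc-nano/miniBSE | miniBSE/io_utils.py | build_atom_ao_ranges
-- ===== SOURCE A (Python) =====
-- def build_atom_ao_ranges(shells):
--
--     atom_ranges = {}
--     ao_counter = 0
--
--     for sh in shells:
--         atom_idx = sh["atom_idx"]
--         nbf = 2 * int(sh["l"]) + 1
--
--         if atom_idx not in atom_ranges:
--             atom_ranges[atom_idx] = [ao_counter, ao_counter + nbf]
--         else:
--             atom_ranges[atom_idx][1] += nbf
--
--         ao_counter += nbf
--
--     return [tuple(atom_ranges[i]) for i in sorted(atom_ranges.keys())]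
-- ===== SOURCE B (Python) =====
-- def build_atom_ao_ranges(shells):
--     # One pass to lay out each shell's absolute AO offset, then a per-atom
--     # read-only pass over that layout; no dict is mutated.
--     info = []
--     off = 0
--     for sh in shells:
--         nbf = 2 * int(sh["l"]) + 1
--         info.append((sh["atom_idx"], off, nbf))
--         off += nbf
--     atoms = sorted({a for (a, _, _) in info})
--     result = []
--     for a in atoms:
--         offs = [o for (b, o, _) in info if b == a]
--         total = sum(n for (b, _, n) in info if b == a)
--         result.append((offs[0], offs[0] + total))
--     return result
-- ===== Notes on version B (the rewrite author's own statement) =====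
-- stated objective: alternative
-- what changed: B replaces A's single pass that mutates a running {atom: [start,end]} dict with a two-phase decomposition: one pass lays out every shell's absolute AO offset (prefix sums), then each atom's range is computed by read-only scans (first offset, plus total width) over that layout; no in-place range updates.
import Mathlib
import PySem

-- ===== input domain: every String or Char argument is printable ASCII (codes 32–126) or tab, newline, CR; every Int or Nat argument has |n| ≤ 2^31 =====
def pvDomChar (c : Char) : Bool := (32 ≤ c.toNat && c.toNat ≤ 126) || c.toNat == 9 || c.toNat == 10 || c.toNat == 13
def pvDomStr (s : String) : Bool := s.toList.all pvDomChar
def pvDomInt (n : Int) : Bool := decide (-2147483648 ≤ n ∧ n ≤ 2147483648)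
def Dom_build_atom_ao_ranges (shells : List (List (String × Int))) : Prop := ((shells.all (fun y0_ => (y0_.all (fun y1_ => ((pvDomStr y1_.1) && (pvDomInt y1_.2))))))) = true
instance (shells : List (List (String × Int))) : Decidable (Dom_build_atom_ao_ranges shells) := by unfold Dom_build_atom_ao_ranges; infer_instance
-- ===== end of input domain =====

-- B replaces A's mutable running dict with a prefix-offset layout pass followed by
-- per-atom read-only scans (alternative decomposition; same observable result).


-- ===== PORT A =====
-- sh["atom_idx"] / sh["l"]: first-match lookup; `getD … 0` is only reached where the key is
-- present (Pre_ below excludes shells missing a key, where Python raises KeyError).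
def pvAtom (sh : List (String × Int)) : Int := PySem.Dict.getD (PySem.Dict.mk sh) "atom_idx" 0
def pvNbf (sh : List (String × Int)) : Int := 2 * PySem.Dict.getD (PySem.Dict.mk sh) "l" 0 + 1

-- one iteration of A's for-loop over state (atom_ranges, ao_counter)
def pvAStep (st : PySem.Dict Int (Int × Int) × Int) (sh : List (String × Int)) :
    PySem.Dict Int (Int × Int) × Int :=
  let atom_idx := pvAtom sh
  let nbf := pvNbf sh
  if st.1.contains atom_idx = false then
    (st.1.insert atom_idx (st.2, st.2 + nbf), st.2 + nbf)
  else
    -- atom_ranges[atom_idx][1] += nbf : read the pair, write it back with end += nbf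
    match st.1.get? atom_idx with
    | some p => (st.1.insert atom_idx (p.1, p.2 + nbf), st.2 + nbf)
    | none => (st.1, st.2 + nbf)   -- unreachable: contains is true here

def build_atom_ao_ranges (shells : List (List (String × Int))) : List (Int × Int) :=
  let st := shells.foldl pvAStep (PySem.Dict.empty, 0)
  (PySem.List.sorted st.1.keys (fun k => k) false).map (fun k => st.1.getD k (0, 0))

-- ===== PORT B =====
-- the layout pass: info.append((atom, off, nbf)); off += nbf
def pvBStep (st : List (Int × Int × Int) × Int) (sh : List (String × Int)) :
    List (Int × Int × Int) × Int :=
  (st.1 ++ [(pvAtom sh, st.2, pvNbf sh)], st.2 + pvNbf sh)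

-- body of B's result loop for one atom a (offs[0] ported as headD; offs is
-- nonempty for every a the loop visits, Python's offs[0] raises only on empty)
def pvBEntry (info : List (Int × Int × Int)) (a : Int) : Int × Int :=
  let offs := (info.filter (fun t => t.1 == a)).map (fun t => t.2.1)
  let total := ((info.filter (fun t => t.1 == a)).map (fun t => t.2.2)).sum
  (offs.headD 0, offs.headD 0 + total)

def build_atom_ao_ranges_alt (shells : List (List (String × Int))) : List (Int × Int) :=
  let info := (shells.foldl pvBStep ([], 0)).1
  let atoms := PySem.List.sorted (PySem.Set.ofList (info.map (fun t => t.1))) (fun a => a) false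
  atoms.map (pvBEntry info)

-- ===== PRECONDITION & SPEC =====
-- Pre_: every shell dict carries both keys "atom_idx" and "l"; on a shell missing one,
-- Python A raises KeyError (and B does too), so those inputs are excluded.
def Pre_build_atom_ao_ranges (shells : List (List (String × Int))) : Prop :=
  ∀ sh ∈ shells, "atom_idx" ∈ sh.map (fun p => p.1) ∧ "l" ∈ sh.map (fun p => p.1)
instance (shells : List (List (String × Int))) : Decidable (Pre_build_atom_ao_ranges shells) := by
  unfold Pre_build_atom_ao_ranges; infer_instance

def pvWitness_build_atom_ao_ranges : (List (List (String × Int))) :=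
  [[("atom_idx", 0), ("l", 1)], [("atom_idx", 1), ("l", 0)], [("atom_idx", 0), ("l", 0)]]

def Spec_build_atom_ao_ranges (shells : List (List (String × Int))) (out : List (Int × Int)) : Prop := out = build_atom_ao_ranges_alt shells
instance (shells : List (List (String × Int))) (out : List (Int × Int)) : Decidable (Spec_build_atom_ao_ranges shells out) := by unfold Spec_build_atom_ao_ranges; infer_instance

-- ===== CLAIM (what is proved, stated in full; the proofs are below) =====
def Claim_equal_build_atom_ao_ranges : Prop := ∀ (shells : List (List (String × Int))), Dom_build_atom_ao_ranges shells → Pre_build_atom_ao_ranges shells → Spec_build_atom_ao_ranges shells (build_atom_ao_ranges shells)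

-- ===== LEMMAS AND PROOFS =====

-- the absolute layout (atom, offset, nbf) of the shells starting at counter c
def pvInfo : List (List (String × Int)) → Int → List (Int × Int × Int)
  | [], _ => []
  | sh :: t, c => (pvAtom sh, c, pvNbf sh) :: pvInfo t (c + pvNbf sh)

lemma bFold_eq (shells : List (List (String × Int))) :
    ∀ (acc : List (Int × Int × Int)) (c : Int),
    (shells.foldl pvBStep (acc, c)) = (acc ++ pvInfo shells c, c + ((pvInfo shells c).map (fun t => t.2.2)).sum) := by
  induction shells with
  | nil => intro acc c; simp [pvInfo]
  | cons sh t ih =>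
      intro acc c
      simp only [List.foldl_cons, pvBStep, pvInfo, ih, List.append_assoc, List.singleton_append,
        List.map_cons, List.sum_cons]
      rw [Prod.mk.injEq]
      exact ⟨rfl, by ring⟩

-- sum of nbf over the rows of atom a
def pvSumA (a : Int) (info : List (Int × Int × Int)) : Int :=
  ((info.filter (fun t => t.1 == a)).map (fun t => t.2.2)).sum

-- what A's loop does to each key, stated against the layout pvInfo
lemma pvAStep_eq (d : PySem.Dict Int (Int × Int)) (c : Int) (sh : List (String × Int)) :
    pvAStep (d, c) sh =
      ((match d.get? (pvAtom sh) with
        | none => d.insert (pvAtom sh) (c, c + pvNbf sh)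
        | some p => d.insert (pvAtom sh) (p.1, p.2 + pvNbf sh)), c + pvNbf sh) := by
  unfold pvAStep
  cases h : d.get? (pvAtom sh) <;>
    simp [PySem.Dict.contains_eq_isSome_get?, h]

lemma aFold_get? (shells : List (List (String × Int))) :
    ∀ (d : PySem.Dict Int (Int × Int)) (c : Int) (a : Int),
    ((shells.foldl pvAStep (d, c)).1).get? a =
      match d.get? a with
      | some p => some (p.1, p.2 + pvSumA a (pvInfo shells c))
      | none =>
        match (pvInfo shells c).filter (fun t => t.1 == a) with
        | [] => none
        | t :: _ => some (t.2.1, t.2.1 + pvSumA a (pvInfo shells c)) := by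
  induction shells with
  | nil =>
      intro d c a
      simp [pvInfo, pvSumA]
      cases d.get? a <;> simp
  | cons sh t ih =>
      intro d c a
      rw [List.foldl_cons, pvAStep_eq]
      cases hp : d.get? (pvAtom sh) with
      | none =>
          rw [ih]
          by_cases ha : a = pvAtom sh
          · subst ha
            rw [hp]
            simp only [pvInfo, pvSumA, List.filter_cons, BEq.rfl,
              PySem.Dict.get?_insert_self]
            simp
            ring
          · rw [PySem.Dict.get?_insert_of_ne _ _ ha]
            have hne : ((pvAtom sh : Int) == a) = false := by
              simpa [beq_iff_eq] using (Ne.symm ha)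
            simp only [pvInfo, pvSumA, List.filter_cons, hne, Bool.false_eq_true, if_false]
      | some p =>
          rw [ih]
          by_cases ha : a = pvAtom sh
          · subst ha
            rw [hp]
            simp only [pvInfo, pvSumA, List.filter_cons, BEq.rfl,
              PySem.Dict.get?_insert_self]
            simp
            ring
          · rw [PySem.Dict.get?_insert_of_ne _ _ ha]
            have hne : ((pvAtom sh : Int) == a) = false := by
              simpa [beq_iff_eq] using (Ne.symm ha)
            simp only [pvInfo, pvSumA, List.filter_cons, hne, Bool.false_eq_true, if_false]

lemma aFold_keys (shells : List (List (String × Int))) :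
    ∀ (d : PySem.Dict Int (Int × Int)) (c : Int),
    ((shells.foldl pvAStep (d, c)).1).keys = PySem.Set.update d.keys ((pvInfo shells c).map (fun t => t.1)) := by
  induction shells with
  | nil => intro d c; simp [pvInfo, PySem.Set.update]
  | cons sh t ih =>
      intro d c
      rw [List.foldl_cons, pvAStep_eq]
      have hkeys : (match d.get? (pvAtom sh) with
          | none => d.insert (pvAtom sh) (c, c + pvNbf sh)
          | some p => d.insert (pvAtom sh) (p.1, p.2 + pvNbf sh)).keys
          = PySem.Set.add d.keys (pvAtom sh) := by
        cases hp : d.get? (pvAtom sh) with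
        | none =>
            have hc : d.contains (pvAtom sh) = false :=
              (PySem.Dict.get?_eq_none_iff_contains _ _).mp hp
            have hm : pvAtom sh ∉ d.keys := by
              rw [PySem.Dict.contains_eq_decide_mem_keys] at hc
              simpa using hc
            rw [PySem.Dict.keys_insert_of_not_contains _ _ hc]
            simp [PySem.Set.add, PySem.Set.contains, hm]
        | some p =>
            have hc : d.contains (pvAtom sh) = true := by
              rw [PySem.Dict.contains_eq_isSome_get?, hp]; rfl
            have hm : pvAtom sh ∈ d.keys := by
              rw [PySem.Dict.contains_eq_decide_mem_keys] at hc
              simpa using hc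
            rw [PySem.Dict.keys_insert_of_contains _ _ hc]
            simp [PySem.Set.add, PySem.Set.contains, hm]
      rw [ih, hkeys]
      simp [pvInfo, PySem.Set.update]

-- filter by atom is nonempty exactly when the atom occurs in the layout
lemma filter_ne_nil_of_mem (info : List (Int × Int × Int)) (a : Int)
    (h : a ∈ info.map (fun t => t.1)) : info.filter (fun t => t.1 == a) ≠ [] := by
  obtain ⟨t, ht, hta⟩ := List.mem_map.mp h
  intro hnil
  have hb : (t.1 == a) = true := by simp [hta]
  have hmem : t ∈ info.filter (fun t => t.1 == a) := List.mem_filter.mpr (And.intro ht hb)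
  rw [hnil] at hmem
  simp at hmem

-- ===== VERDICT (by name: the statement is the Claim_ definition above) =====
theorem build_atom_ao_ranges_spec : Claim_equal_build_atom_ao_ranges := by
  intro shells _ _
  show build_atom_ao_ranges shells = build_atom_ao_ranges_alt shells
  unfold build_atom_ao_ranges build_atom_ao_ranges_alt
  rw [bFold_eq shells [] 0]
  simp only [List.nil_append]
  have hatoms : (shells.foldl pvAStep (PySem.Dict.empty, 0)).1.keys
      = PySem.Set.ofList ((pvInfo shells 0).map (fun t => t.1)) := by
    rw [aFold_keys shells PySem.Dict.empty 0, PySem.Dict.keys_empty,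
      PySem.Set.ofList_eq_foldl]
    rfl
  rw [hatoms]
  apply List.map_congr_left
  intro a ha
  have ha' : a ∈ (pvInfo shells 0).map (fun t => t.1) :=
    (PySem.Set.mem_ofList _ _).mp ((PySem.List.sorted_perm _ _ _).mem_iff.mp ha)
  have hget := aFold_get? shells PySem.Dict.empty 0 a
  rw [PySem.Dict.get?_empty] at hget
  rw [PySem.Dict.getD_eq_get?_getD, hget]
  cases hf : (pvInfo shells 0).filter (fun t => t.1 == a) with
  | nil => exact absurd hf (filter_ne_nil_of_mem _ _ ha')
  | cons t0 rest =>
      simp only [pvBEntry, pvSumA, hf, List.map_cons, List.headD_cons, Option.getD_some]
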